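-- pv_equiv track=rewrite | github.com/gitter-lab/prmf | lib/python/factorlib/ensembl.py | filter_one_to_many
-- ===== SOURCE A (Python) =====
-- def filter_one_to_many(hgnc_to_ensps_map, G):
--   """
--   Return a map from HGNC symbol to one ENSP. The one is chosen to be the first ENSP in G.
--   ENSPs are examined in sorted order.
--
--   Parameters
--   ----------
--   hgnc_to_ensps_map : dict
--     return value of map_hgnc_to_ensps
--
--   copy_map : dict
--     map hgnc to the number of ENSP in the map that also appear in G
--
--   G : nx.Graph
--     protein-protein interaction network such as STRING
--   """
--   rv = {}
--   copy_map = {}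
--   for hgnc, ensps in hgnc_to_ensps_map.items():
--     ensps = sorted(ensps)
--     any_ensp_in_G = False
--     for ensp in ensps:
--       if ensp in G:
--         any_ensp_in_G = True
--         if hgnc in rv:
--           # then this is the second ENSP in G
--           if hgnc in copy_map:
--             copy_map[hgnc] += 1
--           else:
--             copy_map[hgnc] = 2
--         else:
--           rv[hgnc] = ensp
--     if not any_ensp_in_G:
--       # then use the first ensp in sorted order
--       if len(ensps) > 0:
--         rv[hgnc] = ensps[0]
--
--   return rv, copy_map
-- ===== SOURCE B (Python) =====
-- def filter_one_to_many(hgnc_to_ensps_map, G):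
--   """Simpler rewrite: per hgnc, build the filtered sublist of ENSPs present in G,
--   then use min/len reductions instead of sorting and threading a flag/counter."""
--   rv = {}
--   copy_map = {}
--   for hgnc, ensps in hgnc_to_ensps_map.items():
--     in_G = [e for e in ensps if e in G]
--     if in_G:
--       rv[hgnc] = min(in_G)
--       if len(in_G) >= 2:
--         copy_map[hgnc] = len(in_G)
--     elif ensps:
--       rv[hgnc] = min(ensps)
--   return rv, copy_map
-- ===== Notes on version B (the rewrite author's own statement) =====
-- stated objective: simpler
-- what changed: B drops A's per-key sort and its stateful any_ensp_in_G flag / incremental copy counter, instead building the filtered sublist of ENSPs in G once and reducing it with min() and len().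
import Mathlib
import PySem

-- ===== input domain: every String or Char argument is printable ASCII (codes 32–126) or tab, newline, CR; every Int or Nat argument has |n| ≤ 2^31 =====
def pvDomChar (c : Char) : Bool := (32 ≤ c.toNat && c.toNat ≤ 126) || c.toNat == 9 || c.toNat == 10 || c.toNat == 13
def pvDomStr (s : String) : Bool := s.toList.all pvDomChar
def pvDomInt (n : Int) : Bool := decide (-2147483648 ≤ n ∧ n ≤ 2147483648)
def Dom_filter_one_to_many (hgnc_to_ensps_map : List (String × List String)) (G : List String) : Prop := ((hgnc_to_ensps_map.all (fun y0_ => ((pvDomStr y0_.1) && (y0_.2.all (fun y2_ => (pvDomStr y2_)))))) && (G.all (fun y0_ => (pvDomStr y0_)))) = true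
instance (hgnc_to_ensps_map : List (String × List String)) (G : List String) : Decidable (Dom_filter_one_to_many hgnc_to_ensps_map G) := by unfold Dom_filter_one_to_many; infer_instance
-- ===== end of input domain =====

-- B replaces A's per-key sort plus stateful first-hit flag and incremental duplicate counter
-- with a single filtered sublist reduced by min/length (objective: simpler).

-- ===== PORT A =====
-- inner loop body of A ('for ensp in ensps: ...'); state = (rv, copy_map, any_ensp_in_G)
def pvStepA (G : List String) (hgnc : String)
    (s : PySem.Dict String String × PySem.Dict String Int × Bool) (ensp : String) :
    PySem.Dict String String × PySem.Dict String Int × Bool :=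
  if G.contains ensp then
    if s.1.contains hgnc then
      if s.2.1.contains hgnc then (s.1, s.2.1.modify hgnc 0 (· + 1), true)
      else (s.1, s.2.1.insert hgnc 2, true)
    else (s.1.insert hgnc ensp, s.2.1, true)
  else s

-- outer loop body of A ('for hgnc, ensps in hgnc_to_ensps_map.items(): ...')
def pvBodyA (G : List String)
    (st : PySem.Dict String String × PySem.Dict String Int) (p : String × List String) :
    PySem.Dict String String × PySem.Dict String Int :=
  let ensps := PySem.List.sorted p.2 (fun x => x) false
  let s := ensps.foldl (pvStepA G p.1) (st.1, st.2, false)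
  if s.2.2 = false then
    -- 'ensps[0]' is guarded by len(ensps) > 0, so headD's default is unreachable
    if ensps.length > 0 then (s.1.insert p.1 (ensps.headD ""), s.2.1) else (s.1, s.2.1)
  else (s.1, s.2.1)

def filter_one_to_many (hgnc_to_ensps_map : List (String × List String)) (G : List String) :
    (List (String × String)) × (List (String × Int)) :=
  let r := hgnc_to_ensps_map.foldl (pvBodyA G) (PySem.Dict.empty, PySem.Dict.empty)
  (r.1.items, r.2.items)

-- ===== PORT B =====
-- loop body of B: filter once, then min/len reductions
def pvBodyB (G : List String)
    (st : PySem.Dict String String × PySem.Dict String Int) (p : String × List String) :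
    PySem.Dict String String × PySem.Dict String Int :=
  let in_G := p.2.filter (fun e => G.contains e)
  match PySem.List.min? in_G (fun x => x) with
  | some mn =>
      (st.1.insert p.1 mn,
       if 2 ≤ in_G.length then st.2.insert p.1 (in_G.length : Int) else st.2)
  | none =>
      match PySem.List.min? p.2 (fun x => x) with
      | some mn => (st.1.insert p.1 mn, st.2)
      | none => st

def filter_one_to_many_alt (hgnc_to_ensps_map : List (String × List String)) (G : List String) :
    (List (String × String)) × (List (String × Int)) :=
  let r := hgnc_to_ensps_map.foldl (pvBodyB G) (PySem.Dict.empty, PySem.Dict.empty)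
  (r.1.items, r.2.items)

-- ===== PRECONDITION & SPEC =====
-- Pre_ excludes association lists with duplicate HGNC keys: such lists do not represent a
-- Python dict (A's parameter is a dict, whose keys are necessarily distinct), so no behaviour
-- of the Python programs is specified there.
def Pre_filter_one_to_many (hgnc_to_ensps_map : List (String × List String)) (G : List String) : Prop :=
  (hgnc_to_ensps_map.map Prod.fst).Nodup
instance (hgnc_to_ensps_map : List (String × List String)) (G : List String) : Decidable (Pre_filter_one_to_many hgnc_to_ensps_map G) := by unfold Pre_filter_one_to_many; infer_instance

def pvWitness_filter_one_to_many : (List (String × List String)) × List String :=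
  ([("HG1", ["ENSP2", "ENSP1"]), ("HG2", ["ENSP3"])], ["ENSP1", "ENSP2"])

def Spec_filter_one_to_many (hgnc_to_ensps_map : List (String × List String)) (G : List String) (out : (List (String × String)) × (List (String × Int))) : Prop := out = filter_one_to_many_alt hgnc_to_ensps_map G
instance (hgnc_to_ensps_map : List (String × List String)) (G : List String) (out : (List (String × String)) × (List (String × Int))) : Decidable (Spec_filter_one_to_many hgnc_to_ensps_map G out) := by unfold Spec_filter_one_to_many; infer_instance

-- ===== CLAIM (what is proved, stated in full; the proofs are below) =====
def Claim_equal_filter_one_to_many : Prop := ∀ (hgnc_to_ensps_map : List (String × List String)) (G : List String), Dom_filter_one_to_many hgnc_to_ensps_map G → Pre_filter_one_to_many hgnc_to_ensps_map G → Spec_filter_one_to_many hgnc_to_ensps_map G (filter_one_to_many hgnc_to_ensps_map G)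

-- ===== LEMMAS AND PROOFS =====

theorem pv_modify_insert (d : PySem.Dict String Int) (k : String) (v : Int) (f : Int → Int) :
    (d.insert k v).modify k 0 f = d.insert k (f v) := by
  have hg : (d.insert k v).getD k 0 = v := by simp [pysem]
  simp only [PySem.Dict.modify, hg, PySem.Dict.insert_insert_self]

-- A's inner loop after the first hit was recorded and copy_map[hgnc] holds n
theorem pv_stepA_after (G : List String) (hgnc : String) (l : List String)
    (rv : PySem.Dict String String) (cm : PySem.Dict String Int) (n : Int)
    (hrv : rv.contains hgnc = true) :
    l.foldl (pvStepA G hgnc) (rv, cm.insert hgnc n, true)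
      = (rv, cm.insert hgnc (n + ((l.filter (fun e => G.contains e)).length : Int)), true) := by
  induction l generalizing n with
  | nil => simp
  | cons e t ih =>
    cases hG : G.contains e with
    | true =>
      simp only [List.foldl_cons, pvStepA, hG, hrv, if_true,
        PySem.Dict.contains_insert_self, pv_modify_insert]
      rw [ih (n + 1), List.filter_cons]
      simp only [hG, if_true, List.length_cons]
      congr 2
      push_cast
      ring_nf
    | false =>
      simp only [List.foldl_cons, pvStepA, hG, Bool.false_eq_true, if_false]
      rw [ih n, List.filter_cons]
      simp only [hG, Bool.false_eq_true, if_false]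
  -- A's inner loop after the first hit, copy_map not yet touched

theorem pv_stepA_mid (G : List String) (hgnc : String) (l : List String)
    (rv : PySem.Dict String String) (cm : PySem.Dict String Int)
    (hrv : rv.contains hgnc = true) (hcm : cm.contains hgnc = false) :
    l.foldl (pvStepA G hgnc) (rv, cm, true)
      = (rv,
         if (l.filter (fun e => G.contains e)).length = 0 then cm
         else cm.insert hgnc (((l.filter (fun e => G.contains e)).length : Int) + 1), true) := by
  induction l with
  | nil => simp
  | cons e t ih =>
    cases hG : G.contains e with
    | true =>
      simp only [List.foldl_cons, pvStepA, hG, hrv, hcm, if_true, Bool.false_eq_true, if_false]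
      rw [pv_stepA_after G hgnc t rv cm 2 hrv, List.filter_cons]
      simp only [hG, if_true, List.length_cons]
      have h0 : (t.filter (fun e => G.contains e)).length + 1 ≠ 0 := by omega
      rw [if_neg h0]
      congr 2
      push_cast
      ring_nf
    | false =>
      simp only [List.foldl_cons, pvStepA, hG, Bool.false_eq_true, if_false]
      rw [ih, List.filter_cons]
      simp only [hG, Bool.false_eq_true, if_false]

-- A's inner loop from the initial state, characterised by the filtered list
theorem pv_stepA_pre (G : List String) (hgnc : String) (l : List String)
    (rv : PySem.Dict String String) (cm : PySem.Dict String Int)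
    (hrv : rv.contains hgnc = false) (hcm : cm.contains hgnc = false) :
    l.foldl (pvStepA G hgnc) (rv, cm, false)
      = match l.filter (fun e => G.contains e) with
        | [] => (rv, cm, false)
        | e :: rest =>
            (rv.insert hgnc e,
             if rest.length = 0 then cm else cm.insert hgnc ((rest.length : Int) + 1), true) := by
  induction l with
  | nil => simp
  | cons e t ih =>
    cases hG : G.contains e with
    | true =>
      simp only [List.foldl_cons, pvStepA, hG, hrv, if_true, Bool.false_eq_true, if_false]
      rw [pv_stepA_mid G hgnc t (rv.insert hgnc e) cm (PySem.Dict.contains_insert_self rv hgnc e) hcm,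
        List.filter_cons]
      simp only [hG, if_true]
    | false =>
      simp only [List.foldl_cons, pvStepA, hG, Bool.false_eq_true, if_false]
      rw [ih, List.filter_cons]
      simp only [hG, Bool.false_eq_true, if_false]

-- min? of any permutation of a (≤)-sorted nonempty list is the head
theorem pv_min_of_sorted_perm (l l' : List String) (h : String) (t : List String)
    (hp : l.Pairwise (· ≤ ·)) (hperm : l.Perm l') (he : l = h :: t) :
    PySem.List.min? l' (fun x => x) = some h := by
  subst he
  cases hm : PySem.List.min? l' (fun x => x) with
  | none =>
    have : l' = [] := (PySem.List.min?_eq_none_iff ..).1 hm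
    subst this
    exact absurd hperm.symm (by simp)
  | some m =>
    have hmem : m ∈ h :: t := hperm.symm.mem_iff.1 (PySem.List.min?_mem hm)
    have hmin : ∀ y ∈ l', m ≤ y := fun y hy => PySem.List.min?_isMin hm y hy
    have h_le_m : h ≤ m := by
      rcases List.mem_cons.1 hmem with rfl | hmt
      · exact le_refl _
      · exact (List.pairwise_cons.1 hp).1 m hmt
    have m_le_h : m ≤ h := hmin h (hperm.mem_iff.1 (List.mem_cons_self ..))
    exact congrArg some (le_antisymm m_le_h h_le_m)

-- one outer iteration: A's body equals B's body when hgnc is fresh in both dicts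
theorem pv_body_eq (G : List String) (rv : PySem.Dict String String) (cm : PySem.Dict String Int)
    (p : String × List String)
    (hrv : rv.contains p.1 = false) (hcm : cm.contains p.1 = false) :
    pvBodyA G (rv, cm) p = pvBodyB G (rv, cm) p := by
  obtain ⟨hgnc, ensps⟩ := p
  have hperm : (PySem.List.sorted ensps (fun x => x) false).Perm ensps :=
    PySem.List.sorted_perm ensps (fun x => x) false
  have hpair : (PySem.List.sorted ensps (fun x => x) false).Pairwise (· ≤ ·) :=
    PySem.List.sorted_pairwise ensps (fun x => x)
  have hpermf : ((PySem.List.sorted ensps (fun x => x) false).filter (fun e => G.contains e)).Perm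
      (ensps.filter (fun e => G.contains e)) := hperm.filter _
  simp only [pvBodyA, pvBodyB]
  rw [pv_stepA_pre G hgnc _ rv cm hrv hcm]
  cases hfs : (PySem.List.sorted ensps (fun x => x) false).filter (fun e => G.contains e) with
  | nil =>
    rw [hfs] at hpermf
    have hinG : ensps.filter (fun e => G.contains e) = [] := hpermf.symm.eq_nil
    rw [hinG]
    have hm0 : PySem.List.min? ([] : List String) (fun x => x) = none :=
      (PySem.List.min?_eq_none_iff ..).2 rfl
    rw [hm0]
    cases hs : PySem.List.sorted ensps (fun x => x) false with
    | nil =>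
      have he : ensps = [] := (PySem.List.sorted_eq_nil_iff ..).1 hs
      subst he
      simp [hm0]
    | cons h t =>
      have hperm' : (h :: t).Perm ensps := hs ▸ hperm
      have hpair' : (h :: t).Pairwise (· ≤ ·) := hs ▸ hpair
      have hmins : PySem.List.min? ensps (fun x => x) = some h :=
        pv_min_of_sorted_perm (h :: t) ensps h t hpair' hperm' rfl
      rw [hmins]
      simp
  | cons e rest =>
    rw [hfs] at hpermf
    have hpairf : (e :: rest).Pairwise (· ≤ ·) := hfs ▸ (hpair.filter _)
    have hmin : PySem.List.min? (ensps.filter (fun e => G.contains e)) (fun x => x) = some e :=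
      pv_min_of_sorted_perm (e :: rest) _ e rest hpairf hpermf rfl
    have hlen : (ensps.filter (fun e => G.contains e)).length = rest.length + 1 := by
      rw [← hpermf.length_eq]
      simp
    rw [hmin]
    simp only [hlen]
    by_cases h0 : rest.length = 0
    · simp [h0]
    · have h2 : 2 ≤ rest.length + 1 := by omega
      rw [if_neg h0, if_pos h2]
      simp

-- B's body changes no key other than the one it processes
theorem pv_bodyB_contains (G : List String)
    (st : PySem.Dict String String × PySem.Dict String Int) (p : String × List String)
    (k : String) (hk : k ≠ p.1) :
    (pvBodyB G st p).1.contains k = st.1.contains k ∧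
    (pvBodyB G st p).2.contains k = st.2.contains k := by
  have hbeq : (k == p.1) = false := by simp [hk]
  simp only [pvBodyB]
  split
  · constructor
    · simp [PySem.Dict.contains_insert, hbeq]
    · split_ifs <;> simp [PySem.Dict.contains_insert, hbeq]
  · split
    · constructor <;> simp [PySem.Dict.contains_insert, hbeq]
    · exact ⟨rfl, rfl⟩

theorem pv_fold_eq (G : List String) (m : List (String × List String))
    (rv : PySem.Dict String String) (cm : PySem.Dict String Int)
    (hnd : (m.map Prod.fst).Nodup)
    (h : ∀ q ∈ m, rv.contains q.1 = false ∧ cm.contains q.1 = false) :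
    m.foldl (pvBodyA G) (rv, cm) = m.foldl (pvBodyB G) (rv, cm) := by
  induction m generalizing rv cm with
  | nil => rfl
  | cons p t ih =>
    obtain ⟨hrv, hcm⟩ := h p (List.mem_cons_self ..)
    simp only [List.foldl_cons]
    rw [pv_body_eq G rv cm p hrv hcm]
    have hnd' : (t.map Prod.fst).Nodup := (List.nodup_cons.1 (by simpa using hnd)).2
    have hp1 : p.1 ∉ t.map Prod.fst := (List.nodup_cons.1 (by simpa using hnd)).1
    have hpres : ∀ q ∈ t, (pvBodyB G (rv, cm) p).1.contains q.1 = false ∧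
        (pvBodyB G (rv, cm) p).2.contains q.1 = false := by
      intro q hq
      have hne : q.1 ≠ p.1 := by
        intro he
        exact hp1 (he ▸ List.mem_map_of_mem hq)
      obtain ⟨h1, h2⟩ := pv_bodyB_contains G (rv, cm) p q.1 hne
      obtain ⟨h3, h4⟩ := h q (List.mem_cons_of_mem _ hq)
      exact ⟨h1.trans h3, h2.trans h4⟩
    have hfold := ih (pvBodyB G (rv, cm) p).1 (pvBodyB G (rv, cm) p).2 hnd' hpres
    simpa using hfold

-- ===== VERDICT (by name: the statement is the Claim_ definition above) =====
theorem filter_one_to_many_spec : Claim_equal_filter_one_to_many := by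
  intro m G _ hpre
  unfold Spec_filter_one_to_many filter_one_to_many filter_one_to_many_alt
  rw [pv_fold_eq G m PySem.Dict.empty PySem.Dict.empty hpre
    (fun q _ => ⟨PySem.Dict.contains_empty .., PySem.Dict.contains_empty ..⟩)]
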